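-- pv_equiv track=rewrite | github.com/jRodas497/LFP_1S2024_202200389 | Proyecto 1/analizador.py | grupo_lexema
-- ===== SOURCE A (Python) =====
-- def grupo_lexema(cadena):
--     lexema = ''
--     puntero = ''
--
--     for char in cadena:
--         puntero += char
--         if char == '\"':
--             return lexema, cadena[len(puntero):]
--         else :
--             lexema += char
--     return None, None
-- ===== SOURCE B (Python) =====
-- def grupo_lexema(cadena):
--     idx = cadena.find('"')
--     if idx == -1:
--         return None, None
--     return cadena[:idx], cadena[idx + 1:]
-- ===== Notes on version B (the rewrite author's own statement) =====
-- stated objective: idiomatic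
-- what changed: B locates the first double-quote with str.find and returns two slices, replacing A's character-by-character loop that builds two growing accumulator strings.
import Mathlib
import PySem

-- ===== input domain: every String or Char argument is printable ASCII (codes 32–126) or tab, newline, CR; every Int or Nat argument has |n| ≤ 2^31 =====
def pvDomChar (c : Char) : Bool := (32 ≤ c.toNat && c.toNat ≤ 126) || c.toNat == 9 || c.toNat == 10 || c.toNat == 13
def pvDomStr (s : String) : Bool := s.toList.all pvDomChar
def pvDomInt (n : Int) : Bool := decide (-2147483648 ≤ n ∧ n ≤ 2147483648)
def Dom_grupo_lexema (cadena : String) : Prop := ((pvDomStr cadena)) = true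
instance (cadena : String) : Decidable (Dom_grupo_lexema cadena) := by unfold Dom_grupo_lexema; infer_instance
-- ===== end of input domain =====

-- B replaces A's character loop with two accumulator strings by str.find plus two slices (idiomatic).

-- ===== PORT A =====
-- the for-loop of A: state = (lexema, puntero), early return on '"'
def grupoLoop (cadena : String) (chars : List Char) (lexema puntero : List Char) :
    Option String × Option String :=
  match chars with
  | [] => (none, none)
  | c :: rest =>
    let puntero' := puntero ++ [c]
    if c = '"' then
      (some (String.ofList lexema),
       some (PySem.Str.slice cadena (some (puntero'.length : Int)) none))
    else grupoLoop cadena rest (lexema ++ [c]) puntero'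

def grupo_lexema (cadena : String) : Option String × Option String :=
  grupoLoop cadena cadena.toList [] []

-- ===== PORT B =====
def grupo_lexema_alt (cadena : String) : Option String × Option String :=
  let idx := PySem.Str.find cadena "\""
  if idx = -1 then (none, none)
  else (some (PySem.Str.slice cadena none (some idx)),
        some (PySem.Str.slice cadena (some (idx + 1)) none))

-- ===== PRECONDITION & SPEC =====
def Spec_grupo_lexema (cadena : String) (out : Option String × Option String) : Prop := out = grupo_lexema_alt cadena
instance (cadena : String) (out : Option String × Option String) : Decidable (Spec_grupo_lexema cadena out) := by unfold Spec_grupo_lexema; infer_instance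

-- ===== CLAIM (what is proved, stated in full; the proofs are below) =====
def Claim_equal_grupo_lexema : Prop := ∀ (cadena : String), Dom_grupo_lexema cadena → Spec_grupo_lexema cadena (grupo_lexema cadena)

-- ===== LEMMAS AND PROOFS =====

-- first occurrence of '"' characterised by findIdx?
lemma singleton_prefix_iff (c : Char) (l : List Char) : [c] <+: l ↔ l.head? = some c := by
  cases l with
  | nil => simp
  | cons a t => simp [List.cons_prefix_cons, eq_comm]

lemma find_quote_eq_findIdx (s : List Char) :
    PySem.Chars.find s ['"'] =
      match s.findIdx? (· = '"') with
      | none => -1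
      | some j => (j : Int) := by
  cases h : s.findIdx? (· = '"') with
  | none =>
    rw [List.findIdx?_eq_none_iff] at h
    simp only []
    rw [PySem.Chars.find_eq_neg_one_iff, List.singleton_infix_iff]
    intro hm
    simpa using h _ hm
  | some j =>
    obtain ⟨hj, hfi⟩ := List.findIdx?_eq_some_iff_findIdx_eq.mp h
    have hsj : s[j]'hj = '"' := by
      have h1 := List.findIdx_getElem (p := (· = '"')) (xs := s) (w := by rw [hfi]; exact hj)
      simp only [hfi] at h1
      simpa using h1
    have hmem : ('"' : Char) ∈ s := hsj ▸ List.getElem_mem hj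
    have hnn : 0 ≤ PySem.Chars.find s ['"'] := by
      rw [PySem.Chars.find_nonneg_iff, List.singleton_infix_iff]; exact hmem
    obtain ⟨hpre, hmin⟩ := PySem.Chars.find_spec hnn
    set f := PySem.Chars.find s ['"'] with hf
    -- f.toNat ≤ j : prefix holds at j
    have hatj : ['"'] <+: s.drop j := by
      rw [singleton_prefix_iff, List.head?_drop, List.getElem?_eq_getElem hj, hsj]
    have hle : f.toNat ≤ j := by
      by_contra hlt
      exact hmin j (by omega) hatj
    -- j ≤ f.toNat : s[f.toNat] = '"' and findIdx minimality
    have hge : j ≤ f.toNat := by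
      by_contra hlt
      rw [not_le] at hlt
      have hflen : f.toNat < s.length := by omega
      have : s[f.toNat]'hflen = '"' := by
        rw [singleton_prefix_iff, List.head?_drop, List.getElem?_eq_getElem hflen] at hpre
        simpa using hpre
      have hne : (fun x => decide (x = '"')) (s[f.toNat]'hflen) = false :=
        List.not_of_lt_findIdx (by rw [hfi]; exact hlt)
      simp [this] at hne
    simp only []
    omega

lemma grupoLoop_eq (cadena : String) (chars pref : List Char)
    (h : cadena.toList = pref ++ chars) :
    grupoLoop cadena chars pref pref =
      match chars.findIdx? (· = '"') with
      | none => (none, none)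
      | some j =>
        (some (String.ofList (pref ++ chars.take j)),
         some (String.ofList (chars.drop (j + 1)))) := by
  induction chars generalizing pref with
  | nil => simp [grupoLoop]
  | cons c rest ih =>
    by_cases hc : c = '"'
    · subst hc
      have hs : PySem.Str.slice cadena (some ((pref.length : Int) + 1)) none
          = String.ofList rest := by
        apply String.toList_inj.mp
        rw [show ((pref.length : Int) + 1) = ((pref.length + 1 : Nat) : Int) by push_cast; ring]
        rw [PySem.Str.toList_slice, PySem.Chars.slice_eq_listSlice,
          PySem.List.slice_from_natCast, String.toList_ofList, h]
        simp [List.drop_append]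
      simp [grupoLoop, List.findIdx?_cons, hs]
    · have hstep : grupoLoop cadena (c :: rest) pref pref
          = grupoLoop cadena rest (pref ++ [c]) (pref ++ [c]) := by
        simp [grupoLoop, hc]
      rw [hstep, ih (pref ++ [c]) (by simpa using h), List.findIdx?_cons]
      simp only [hc, decide_false, Bool.false_eq_true, if_false]
      cases rest.findIdx? (· = '"') with
      | none => simp
      | some j => simp [List.take_succ_cons, List.drop_succ_cons]

theorem grupo_lexema_spec : Claim_equal_grupo_lexema := by
  intro cadena _
  unfold Spec_grupo_lexema grupo_lexema grupo_lexema_alt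
  rw [grupoLoop_eq cadena cadena.toList [] (by simp)]
  simp only [PySem.Str.find_eq]
  rw [show ("\"" : String).toList = ['"'] from rfl, find_quote_eq_findIdx]
  cases h : cadena.toList.findIdx? (· = '"') with
  | none => simp
  | some j =>
    have hj : j < cadena.toList.length := (List.findIdx?_eq_some_iff_findIdx_eq.mp h).1
    have h1 : PySem.Str.slice cadena none (some (j : Int)) = String.ofList (cadena.toList.take j) := by
      apply String.toList_inj.mp
      rw [PySem.Str.toList_slice, PySem.Chars.slice_eq_listSlice,
        PySem.List.slice_to_natCast, String.toList_ofList]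
    have h2 : PySem.Str.slice cadena (some ((j : Int) + 1)) none = String.ofList (cadena.toList.drop (j + 1)) := by
      apply String.toList_inj.mp
      rw [show ((j : Int) + 1) = ((j + 1 : Nat) : Int) by push_cast; ring]
      rw [PySem.Str.toList_slice, PySem.Chars.slice_eq_listSlice,
        PySem.List.slice_from_natCast, String.toList_ofList]
    simp only []
    rw [if_neg (by omega), h1, h2]
    simp
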